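-- pv_equiv track=rewrite | github.com/kb-dk/dependency-tree-parser | converter.py | __enforce_version
-- ===== SOURCE A (Python) =====
-- def __enforce_version(version):
--     """Enforces a specific syntax for the version of a dependency.
--     The rule is that every version should have a suffix, middle, and a prefix separated by periods.
--     E.g. '1.0' will be '1.0.0' and '2.30' will be '2.30.0'.
--     """
--     splits = version.split(".")
--     if len(splits) < 3:
--         split = splits[-1]
--         if not any(c.isalpha() for c in split):
--             version = version + ".0"
--             version = __enforce_version(version)
--     return version
-- ===== SOURCE B (Python) =====
-- def __enforce_version(version):
--     """Pad version to three dot-separated parts in one step (no recursion):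
--     split once, and if there are fewer than three parts and the last part
--     contains no letter, append the missing '.0' parts in a single closed form."""
--     parts = version.split(".")
--     if len(parts) < 3 and not any(c.isalpha() for c in parts[-1]):
--         version += ".0" * (3 - len(parts))
--     return version
-- ===== Notes on version B (the rewrite author's own statement) =====
-- stated objective: simpler
-- what changed: Replaces A's recursion (which re-splits the string and appends '.0' once per call) by a single split and one closed-form append of '.0' * (3 - len(parts)).
import Mathlib
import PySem

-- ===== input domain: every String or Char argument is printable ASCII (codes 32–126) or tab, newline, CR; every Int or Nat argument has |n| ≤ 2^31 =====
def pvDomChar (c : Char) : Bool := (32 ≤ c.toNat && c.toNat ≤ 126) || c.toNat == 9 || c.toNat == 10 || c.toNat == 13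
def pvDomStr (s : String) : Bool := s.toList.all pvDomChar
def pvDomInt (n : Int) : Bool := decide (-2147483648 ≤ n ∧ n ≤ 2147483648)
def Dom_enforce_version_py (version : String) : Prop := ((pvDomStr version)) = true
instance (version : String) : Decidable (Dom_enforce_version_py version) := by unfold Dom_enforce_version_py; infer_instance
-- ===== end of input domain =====

-- B replaces A's recursion (re-split and append ".0" once per call) by a single split
-- and one closed-form append of the missing '.0' parts; objective: simpler.

-- ===== PORT A =====
-- termination helpers for A's recursion (fuel-independence of splitOn.go and the
-- effect of appending ".0" on the split):
theorem pv_go_fuel (l : List Char) : ∀ (f g : Nat) (cur : List Char) (acc : List (List Char)),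
    l.length ≤ f → l.length ≤ g →
    PySem.Chars.splitOn.go ['.'] f l cur acc = PySem.Chars.splitOn.go ['.'] g l cur acc := by
  induction l with
  | nil =>
    intro f g cur acc _ _
    cases f <;> cases g <;> simp [PySem.Chars.splitOn.go]
  | cons c rest ih =>
    intro f g cur acc hf hg
    simp only [List.length_cons] at hf hg
    obtain ⟨f', rfl⟩ : ∃ f', f = f' + 1 := ⟨f - 1, by omega⟩
    obtain ⟨g', rfl⟩ : ∃ g', g = g' + 1 := ⟨g - 1, by omega⟩
    simp only [PySem.Chars.splitOn.go]
    split
    · exact ih f' g' [] (cur.reverse :: acc) (by omega) (by omega)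
    · exact ih f' g' (c :: cur) acc (by omega) (by omega)

theorem pv_go_append (l : List Char) : ∀ (f : Nat) (cur : List Char) (acc : List (List Char)),
    l.length + 3 ≤ f →
    PySem.Chars.splitOn.go ['.'] f (l ++ ['.', '0']) cur acc
      = PySem.Chars.splitOn.go ['.'] f l cur acc ++ [['0']] := by
  induction l with
  | nil =>
    intro f cur acc hf
    obtain ⟨f', rfl⟩ : ∃ f', f = f' + 3 := ⟨f - 3, by omega⟩
    simp [PySem.Chars.splitOn.go, List.IsPrefix]
  | cons c rest ih =>
    intro f cur acc hf
    simp only [List.length_cons] at hf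
    obtain ⟨f', rfl⟩ : ∃ f', f = f' + 1 := ⟨f - 1, by omega⟩
    simp only [List.cons_append, PySem.Chars.splitOn.go]
    have hpre : (['.'].isPrefixOf (c :: (rest ++ ['.', '0']))) = (['.'].isPrefixOf (c :: rest)) := by
      simp [List.isPrefixOf]
    rw [hpre]
    split
    · rw [show List.drop ['.'].length (c :: (rest ++ ['.', '0'])) = rest ++ ['.', '0'] by simp,
          show List.drop ['.'].length (c :: rest) = rest by simp]
      exact ih f' [] (cur.reverse :: acc) (by omega)
    · exact ih f' (c :: cur) acc (by omega)

theorem pv_split_append (cs : List Char) :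
    PySem.Chars.splitOn (cs ++ ['.', '0']) ['.'] = PySem.Chars.splitOn cs ['.'] ++ [['0']] := by
  unfold PySem.Chars.splitOn
  rw [show (cs ++ ['.', '0']).length + 1 = cs.length + 3 by simp]
  rw [pv_go_append cs (cs.length + 3) [] [] (by omega)]
  rw [pv_go_fuel cs (cs.length + 3) (cs.length + 1) [] [] (by omega) (by omega)]

theorem pv_split_len_append (v : String) :
    (PySem.Chars.splitOn (v ++ ".0").toList ['.']).length
      = (PySem.Chars.splitOn v.toList ['.']).length + 1 := by
  rw [show (v ++ ".0").toList = v.toList ++ ['.', '0'] by simp, pv_split_append]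
  simp

def enforce_version_py (version : String) : String :=
  let splits := PySem.Chars.splitOn version.toList ['.']
  if h : splits.length < 3 then
    let split := PySem.List.pyGetD splits (-1) []
    if ¬ (split.any PySem.Chars.isalpha) then
      enforce_version_py (version ++ ".0")
    else version
  else version
termination_by 3 - (PySem.Chars.splitOn version.toList ['.']).length
decreasing_by
  have h' : (PySem.Chars.splitOn version.toList ['.']).length < 3 := h
  rw [pv_split_len_append]
  omega

-- ===== PORT B =====
def enforce_version_py_alt (version : String) : String :=
  let parts := PySem.Chars.splitOn version.toList ['.']
  if parts.length < 3 ∧ ¬ ((PySem.List.pyGetD parts (-1) []).any PySem.Chars.isalpha) then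
    version ++ String.ofList ((List.replicate (3 - parts.length) ['.', '0']).flatten)
  else version

-- ===== PRECONDITION & SPEC =====
def Spec_enforce_version_py (version : String) (out : String) : Prop := out = enforce_version_py_alt version
instance (version : String) (out : String) : Decidable (Spec_enforce_version_py version out) := by unfold Spec_enforce_version_py; infer_instance

-- ===== CLAIM (what is proved, stated in full; the proofs are below) =====
def Claim_equal_enforce_version_py : Prop := ∀ (version : String), Dom_enforce_version_py version → Spec_enforce_version_py version (enforce_version_py version)

-- ===== LEMMAS AND PROOFS =====
theorem pv_go_ne_nil (l : List Char) : ∀ (f : Nat) (cur : List Char) (acc : List (List Char)),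
    PySem.Chars.splitOn.go ['.'] f l cur acc ≠ [] := by
  induction l with
  | nil => intro f cur acc; cases f <;> simp [PySem.Chars.splitOn.go]
  | cons c rest ih =>
    intro f cur acc
    cases f with
    | zero => simp [PySem.Chars.splitOn.go]
    | succ f' =>
      simp only [PySem.Chars.splitOn.go]
      split
      · exact ih f' [] (cur.reverse :: acc)
      · exact ih f' (c :: cur) acc

theorem pv_split_ne_nil (cs : List Char) : PySem.Chars.splitOn cs ['.'] ≠ [] :=
  pv_go_ne_nil cs (cs.length + 1) [] []

theorem pv_last_append (v : String) :
    PySem.List.pyGetD (PySem.Chars.splitOn (v ++ ".0").toList ['.']) (-1) [] = ['0'] := by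
  rw [show (v ++ ".0").toList = v.toList ++ ['.', '0'] by simp, pv_split_append]
  exact PySem.List.pyGetD_neg_one_append_singleton _ _ _

theorem pv_main (v : String) : enforce_version_py v = enforce_version_py_alt v := by
  rw [enforce_version_py]
  simp only [enforce_version_py_alt]
  set parts := PySem.Chars.splitOn v.toList ['.'] with hparts
  by_cases h3 : parts.length < 3
  · by_cases ha : (PySem.List.pyGetD parts (-1) []).any PySem.Chars.isalpha
    · simp [h3, ha]
    · -- A recurses; parts.length is 1 or 2 (never 0)
      have hne := pv_split_ne_nil v.toList
      rw [← hparts] at hne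
      have hlen : parts.length = 1 ∨ parts.length = 2 := by
        have : parts.length ≠ 0 := by simpa [List.length_eq_zero_iff] using hne
        omega
      simp only [h3, ha]
      rw [enforce_version_py]
      have hl1 : (PySem.Chars.splitOn (v ++ ".0").toList ['.']).length = parts.length + 1 := by
        rw [pv_split_len_append, hparts]
      have hlast1 := pv_last_append v
      rcases hlen with h | h
      · -- one more recursive call
        simp only [hl1, h, hlast1]
        norm_num
        rw [enforce_version_py]
        have hl2 : (PySem.Chars.splitOn ((v ++ ".0") ++ ".0").toList ['.']).length = 3 := by
          rw [pv_split_len_append, hl1, h]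
        have hlast2 := pv_last_append (v ++ ".0")
        simp only [hl2, hlast2]
        norm_num
        apply String.ext
        simp [show PySem.Chars.isalpha '0' = false from by decide]
      · simp only [hl1, h, hlast1]
        norm_num
  · simp [h3]

-- ===== VERDICT (by name: the statement is the Claim_ definition above) =====
theorem enforce_version_py_spec : Claim_equal_enforce_version_py := by
  intro v _
  unfold Spec_enforce_version_py
  exact pv_main v
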